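-- pv_equiv track=rewrite | github.com/zhuermu/zmead | ai-orchestrator/tests/test_execution_order_property.py | validate_execution_order
-- ===== SOURCE A (Python) =====
-- MODULE_DEPENDENCIES = {
--     "creative": [],  # No dependencies
--     "reporting": [],  # No dependencies
--     "market_intel": [],  # No dependencies
--     "landing_page": [],  # No dependencies
--     "ad_engine": ["creative", "landing_page"],  # Requires creative and landing_page
-- }
--
-- def validate_execution_order(execution_order: list[str]) -> bool:
--     """Validate that execution order respects dependencies.
--
--     Returns True if all dependencies are satisfied.
--     """
--     executed = set()
--
--     for module in execution_order:
--         # Check all dependencies have been executed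
--         deps = MODULE_DEPENDENCIES.get(module, [])
--         for dep in deps:
--             if dep in execution_order and dep not in executed:
--                 return False
--         executed.add(module)
--
--     return True
-- ===== SOURCE B (Python) =====
-- MODULE_DEPENDENCIES = {
--     "creative": [],
--     "reporting": [],
--     "market_intel": [],
--     "landing_page": [],
--     "ad_engine": ["creative", "landing_page"],
-- }
--
-- def validate_execution_order(execution_order: list[str]) -> bool:
--     """Validate that execution order respects dependencies.
--
--     Positional formulation: a dependency is satisfied iff its first
--     occurrence comes strictly before the module's first occurrence.
--     """
--     index = {}
--     for i, module in enumerate(execution_order):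
--         index.setdefault(module, i)
--     for module in execution_order:
--         for dep in MODULE_DEPENDENCIES.get(module, []):
--             j = index.get(dep)
--             if j is not None and j >= index[module]:
--                 return False
--     return True
-- ===== Notes on version B (the rewrite author's own statement) =====
-- stated objective: alternative
-- what changed: Replaces the running 'executed' set with a precomputed first-occurrence index table (built once with enumerate/setdefault) and a positional comparison pass: a dependency is satisfied iff its first index is strictly smaller than the module's first index.
import Mathlib
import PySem

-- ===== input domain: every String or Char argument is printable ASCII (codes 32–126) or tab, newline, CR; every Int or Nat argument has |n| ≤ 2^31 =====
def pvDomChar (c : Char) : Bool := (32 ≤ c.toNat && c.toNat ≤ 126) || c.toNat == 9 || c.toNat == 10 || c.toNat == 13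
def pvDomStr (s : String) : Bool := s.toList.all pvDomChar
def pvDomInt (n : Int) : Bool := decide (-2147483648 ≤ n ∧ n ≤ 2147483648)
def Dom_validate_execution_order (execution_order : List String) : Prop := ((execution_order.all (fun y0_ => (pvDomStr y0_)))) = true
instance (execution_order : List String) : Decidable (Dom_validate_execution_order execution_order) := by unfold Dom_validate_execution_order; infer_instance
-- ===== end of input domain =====

-- B replaces A's running 'executed' set with a precomputed first-occurrence index table
-- and a positional comparison pass (alternative decomposition, same cost).

-- ===== PORT A =====
def MODULE_DEPENDENCIES : PySem.Dict String (List String) :=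
  PySem.Dict.ofList [("creative", []), ("reporting", []), ("market_intel", []),
    ("landing_page", []), ("ad_engine", ["creative", "landing_page"])]

-- inner 'for dep in deps: if dep in execution_order and dep not in executed: return False'
def vaoDepsOk (execution_order : List String) (executed : PySem.Set String) : List String → Bool
  | [] => true
  | dep :: rest =>
      if execution_order.contains dep && !(PySem.Set.contains executed dep) then false
      else vaoDepsOk execution_order executed rest

-- outer 'for module in execution_order' loop carrying the 'executed' set
def vaoLoop (execution_order : List String) : List String → PySem.Set String → Bool
  | [], _ => true
  | m :: rest, executed =>
      if vaoDepsOk execution_order executed (MODULE_DEPENDENCIES.getD m []) then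
        vaoLoop execution_order rest (PySem.Set.add executed m)
      else false

def validate_execution_order (execution_order : List String) : Bool :=
  vaoLoop execution_order execution_order PySem.Set.empty

-- ===== PORT B =====
-- 'index = {}; for i, module in enumerate(execution_order): index.setdefault(module, i)'
def vaoBuildIndex (execution_order : List String) : PySem.Dict String Int :=
  (PySem.List.enumerate execution_order).foldl
    (fun d p => d.setdefault p.2 p.1) PySem.Dict.empty

-- inner 'for dep in ...: j = index.get(dep); if j is not None and j >= i: return False'
def vaoAltDepsOk (index : PySem.Dict String Int) (i : Int) : List String → Bool
  | [] => true
  | dep :: rest =>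
      match index.get? dep with
      | some j => if j ≥ i then false else vaoAltDepsOk index i rest
      | none => vaoAltDepsOk index i rest

-- second pass 'for module in execution_order'; 'index[module]' never misses since
-- module ∈ execution_order, so the KeyError branch is unreachable (getD 0 is exact there)
def vaoAltLoop (index : PySem.Dict String Int) : List String → Bool
  | [] => true
  | m :: rest =>
      if vaoAltDepsOk index (index.getD m 0) (MODULE_DEPENDENCIES.getD m []) then
        vaoAltLoop index rest
      else false

def validate_execution_order_alt (execution_order : List String) : Bool :=
  vaoAltLoop (vaoBuildIndex execution_order) execution_order

-- ===== PRECONDITION & SPEC =====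
def Spec_validate_execution_order (execution_order : List String) (out : Bool) : Prop := out = validate_execution_order_alt execution_order
instance (execution_order : List String) (out : Bool) : Decidable (Spec_validate_execution_order execution_order out) := by unfold Spec_validate_execution_order; infer_instance

-- ===== CLAIM (what is proved, stated in full; the proofs are below) =====
def Claim_equal_validate_execution_order : Prop := ∀ (execution_order : List String), Dom_validate_execution_order execution_order → Spec_validate_execution_order execution_order (validate_execution_order execution_order)

-- ===== LEMMAS AND PROOFS =====

-- only "ad_engine" has a non-empty dependency list
lemma deps_getD (m : String) :
    MODULE_DEPENDENCIES.getD m [] =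
      if m = "ad_engine" then ["creative", "landing_page"] else [] := by
  have h : MODULE_DEPENDENCIES = PySem.Dict.mk [("creative", []), ("reporting", []),
      ("market_intel", []), ("landing_page", []),
      ("ad_engine", ["creative", "landing_page"])] := by rfl
  rw [h]
  simp only [PySem.Dict.getD_eq_get?_getD, PySem.Dict.get?_mk_cons, beq_iff_eq]
  split_ifs with h1 h2 h3 h4 h5 <;> first | rfl | (subst_vars; rfl) | simp_all

-- the setdefault/enumerate fold is the first-occurrence index of the list
lemma buildIndex_get?_aux (l : List String) : ∀ (s : Int) (d : PySem.Dict String Int) (m : String),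
    ((PySem.List.enumerate l s).foldl (fun d p => d.setdefault p.2 p.1) d).get? m
      = ((d.get? m).or ((PySem.List.index? l m).map (fun k => s + (k : Int)))) := by
  induction l with
  | nil => intro s d m; simp [PySem.List.enumerate, PySem.List.index?]
  | cons x l ih =>
    intro s d m
    rw [PySem.List.enumerate_cons]
    simp only [List.foldl_cons]
    rw [ih]
    by_cases hm : m = x
    · subst hm
      rw [PySem.List.index?_cons_self, PySem.Dict.get?_setdefault_self]
      cases h : d.get? m <;> simp
    · rw [PySem.List.index?_cons_of_ne l (fun h => hm (Eq.symm h)),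
        PySem.Dict.get?_setdefault_of_ne d s hm]
      cases h : d.get? m
      · simp only [Option.none_or]
        cases hk : PySem.List.index? l m <;> simp
        ring
      · simp

lemma buildIndex_get? (eo : List String) (m : String) :
    (vaoBuildIndex eo).get? m = (PySem.List.index? eo m).map (fun k => (k : Int)) := by
  rw [vaoBuildIndex, buildIndex_get?_aux]
  cases PySem.List.index? eo m <;> simp [PySem.Dict.get?_empty]

-- per-dependency check of A, in closed positional form
def chkA (eo : List String) (ex : PySem.Set String) (rest : List String) (d : String) : Bool :=
  !(eo.contains d) || ex.contains d || decide (rest.idxOf d < rest.idxOf "ad_engine")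

lemma vaoLoop_char (eo : List String) :
    ∀ (rest : List String) (ex : PySem.Set String),
      vaoLoop eo rest ex =
        (!(rest.contains "ad_engine") ||
          (chkA eo ex rest "creative" && chkA eo ex rest "landing_page")) := by
  intro rest
  induction rest with
  | nil => intro ex; simp [vaoLoop]
  | cons m rest ih =>
    intro ex
    rw [vaoLoop, deps_getD]
    by_cases hm : m = "ad_engine"
    · subst hm
      rw [if_pos rfl]
      simp only [vaoDepsOk, ih, chkA, List.idxOf_cons, List.contains_cons]
      by_cases hc : eo.contains "creative" = true <;>
        by_cases hxc : PySem.Set.contains ex "creative" = true <;>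
        by_cases hl : eo.contains "landing_page" = true <;>
        by_cases hxl : PySem.Set.contains ex "landing_page" = true <;>
          simp_all [PySem.Set.mem_add, PySem.Set.contains]
    · rw [if_neg hm]
      simp only [vaoDepsOk, if_true, ih, chkA, List.idxOf_cons, List.contains_cons]
      by_cases hmc : m = "creative" <;> by_cases hml : m = "landing_page" <;>
        simp_all [PySem.Set.mem_add, PySem.Set.contains]
      have had : ("ad_engine" == m) = false := beq_eq_false_iff_ne.mpr (Ne.symm hm)
      simp [Bool.cond_eq_ite, hm, hmc, hml, Ne.symm hmc, Ne.symm hml, had]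

-- per-dependency check of B, in closed positional form (independent of the suffix)
def chkB (idx : PySem.Dict String Int) (d : String) : Bool :=
  match idx.get? d with
  | some j => decide (j < idx.getD "ad_engine" 0)
  | none => true

lemma altDepsOk_pair (idx : PySem.Dict String Int) :
    vaoAltDepsOk idx (idx.getD "ad_engine" 0) ["creative", "landing_page"]
      = (chkB idx "creative" && chkB idx "landing_page") := by
  simp only [vaoAltDepsOk, chkB]
  cases idx.get? "creative" <;> cases idx.get? "landing_page" <;> simp [← decide_not]

lemma vaoAltLoop_char (idx : PySem.Dict String Int) :
    ∀ (rest : List String),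
      vaoAltLoop idx rest =
        (!(rest.contains "ad_engine") || (chkB idx "creative" && chkB idx "landing_page")) := by
  intro rest
  induction rest with
  | nil => simp [vaoAltLoop]
  | cons m rest ih =>
    rw [vaoAltLoop, deps_getD]
    by_cases hm : m = "ad_engine"
    · subst hm
      rw [if_pos rfl, altDepsOk_pair]
      by_cases h : (chkB idx "creative" && chkB idx "landing_page") = true
      · rw [if_pos h, ih]
        simp [h]
      · rw [if_neg h]
        simp only [List.contains_cons, beq_self_eq_true, Bool.true_or, Bool.not_true,
          Bool.false_or]
        exact (Bool.eq_false_iff.mpr h).symm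
    · rw [if_neg hm]
      simp [vaoAltDepsOk, ih, Ne.symm hm]

lemma idxOf?_mem (l : List String) (d : String) (h : d ∈ l) :
    l.idxOf? d = some (l.idxOf d) := by
  induction l with
  | nil => simp at h
  | cons x l ih =>
    by_cases hx : x = d
    · subst hx; simp [List.idxOf?_cons]
    · have hb : (x == d) = false := beq_eq_false_iff_ne.mpr hx
      have hd : d ∈ l := by
        rcases List.mem_cons.mp h with h1 | h1
        · exact absurd h1.symm hx
        · exact h1
      simp [List.idxOf?_cons, List.idxOf_cons, hb, ih hd]

-- the two per-dependency checks agree once "ad_engine" occurs in the list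
lemma chk_glue (eo : List String) (d : String) (had : "ad_engine" ∈ eo) :
    chkA eo PySem.Set.empty eo d = chkB (vaoBuildIndex eo) d := by
  have hidx : ∀ m, (vaoBuildIndex eo).get? m
      = (PySem.List.index? eo m).map (fun k => (k : Int)) := buildIndex_get? eo
  have hada : eo.idxOf? "ad_engine" = some (eo.idxOf "ad_engine") := idxOf?_mem eo _ had
  by_cases hd : d ∈ eo
  · have hdd : eo.idxOf? d = some (eo.idxOf d) := idxOf?_mem eo d hd
    simp [chkA, chkB, hidx, hdd, hada, PySem.Dict.getD_eq_get?_getD, hd,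
      PySem.Set.contains, PySem.Set.empty, Nat.cast_lt]
  · have hdd : eo.idxOf? d = none := by
      simpa using (PySem.List.index?_eq_none_iff eo d).mpr hd
    simp [chkA, chkB, hidx, hdd, hd]

-- ===== VERDICT (by name: the statement is the Claim_ definition above) =====
theorem validate_execution_order_spec : Claim_equal_validate_execution_order := by
  intro eo _hdom
  unfold Spec_validate_execution_order
  rw [validate_execution_order, validate_execution_order_alt, vaoLoop_char, vaoAltLoop_char]
  by_cases had : "ad_engine" ∈ eo
  · rw [chk_glue eo "creative" had, chk_glue eo "landing_page" had]
  · simp [had]
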